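-- pv_equiv track=rewrite | github.com/samiaghezal/nau-sql | nc_gq/gq_nc_type_to_sql.py | get_pg_type
-- ===== SOURCE A (Python) =====
-- def get_pg_type(gq_type: str) -> str:
--     """Convert GraphQL types to PostgreSQL types."""
--     type_mapping = {
--         'String': 'TEXT',
--         'Int': 'INTEGER',
--         'Float': 'DECIMAL',
--         'Boolean': 'BOOLEAN',
--         'ID': 'UUID',
--         'DateTime': 'TIMESTAMP',
--         'Date': 'DATE',
--         'BigInt': 'BIGINT',
--         'Decimal': 'DECIMAL',
--         'UUID': 'UUID',
--         'JSONString': 'JSONB',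
--         'Upload': 'TEXT',  # Store file path/URL
--         'Money': 'DECIMAL',
--     }
--
--     # Handle array types (marked with "[" prefix)
--     if gq_type.startswith('['):
--         base_type = gq_type[1:]  # Remove the "["
--         pg_base_type = get_pg_type(base_type)
--         return f'{pg_base_type}[]'
--
--     return type_mapping.get(gq_type, 'TEXT')  # Default to TEXT for unknown types
-- ===== SOURCE B (Python) =====
-- PG_PAIRS = [
--     ('String', 'TEXT'),
--     ('Int', 'INTEGER'),
--     ('Float', 'DECIMAL'),
--     ('Boolean', 'BOOLEAN'),
--     ('ID', 'UUID'),
--     ('DateTime', 'TIMESTAMP'),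
--     ('Date', 'DATE'),
--     ('BigInt', 'BIGINT'),
--     ('Decimal', 'DECIMAL'),
--     ('UUID', 'UUID'),
--     ('JSONString', 'JSONB'),
--     ('Upload', 'TEXT'),
--     ('Money', 'DECIMAL'),
-- ]
--
--
-- def get_pg_type(gq_type: str) -> str:
--     """Convert GraphQL types to PostgreSQL types.
--
--     Iterative: strip the leading list-marker brackets in one go, scan a
--     pair table for the base name, append that many '[]' suffixes."""
--     base = gq_type.lstrip('[')
--     depth = len(gq_type) - len(base)
--     suffix = '[]' * depth
--     for gq, pg in PG_PAIRS:
--         if gq == base: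
--             return pg + suffix
--     return 'TEXT' + suffix
-- ===== Notes on version B (the rewrite author's own statement) =====
-- stated objective: simpler
-- what changed: Replaced the recursive one-bracket-at-a-time self-call and dict lookup with a single lstrip of the leading brackets, a linear scan of a pair table for the base name, and the bracket-pair suffix appended once.
import Mathlib
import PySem

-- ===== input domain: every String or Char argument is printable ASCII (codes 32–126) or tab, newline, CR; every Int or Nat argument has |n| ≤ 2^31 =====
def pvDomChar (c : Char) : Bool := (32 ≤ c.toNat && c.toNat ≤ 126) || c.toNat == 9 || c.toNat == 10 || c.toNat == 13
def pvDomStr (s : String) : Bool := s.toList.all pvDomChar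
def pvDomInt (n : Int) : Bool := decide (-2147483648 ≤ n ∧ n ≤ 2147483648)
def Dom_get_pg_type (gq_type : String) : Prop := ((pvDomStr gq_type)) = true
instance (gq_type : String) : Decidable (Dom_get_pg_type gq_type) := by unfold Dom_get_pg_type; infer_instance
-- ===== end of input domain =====

-- B replaces A's recursive bracket peeling + dict lookup by one lstrip of the leading
-- brackets, a linear scan of a pair table, and the '[]' suffix appended once (simpler).

-- ===== PORT A =====
-- A's dict literal
def pvTypeMapping : PySem.Dict String String := PySem.Dict.ofList
  [("String", "TEXT"), ("Int", "INTEGER"), ("Float", "DECIMAL"), ("Boolean", "BOOLEAN"),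
   ("ID", "UUID"), ("DateTime", "TIMESTAMP"), ("Date", "DATE"), ("BigInt", "BIGINT"),
   ("Decimal", "DECIMAL"), ("UUID", "UUID"), ("JSONString", "JSONB"), ("Upload", "TEXT"),
   ("Money", "DECIMAL")]

-- A's recursion on the characters: startswith test = head char; gq_type[1:] = tail.
def pvGetPgA : List Char → String
  | '[' :: rest => pvGetPgA rest ++ "[]"
  | cs => PySem.Dict.getD pvTypeMapping (String.ofList cs) "TEXT"

def get_pg_type (gq_type : String) : String := pvGetPgA gq_type.toList

-- ===== PORT B =====
-- B's pair table (a Python list of tuples, not a dict)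
def pvPgPairs : List (String × String) :=
  [("String", "TEXT"), ("Int", "INTEGER"), ("Float", "DECIMAL"), ("Boolean", "BOOLEAN"),
   ("ID", "UUID"), ("DateTime", "TIMESTAMP"), ("Date", "DATE"), ("BigInt", "BIGINT"),
   ("Decimal", "DECIMAL"), ("UUID", "UUID"), ("JSONString", "JSONB"), ("Upload", "TEXT"),
   ("Money", "DECIMAL")]

-- s.lstrip('['): drop the leading '[' characters (hand port, exact: single strip char)
def pvLstripBrackets (cs : List Char) : List Char := cs.dropWhile (· == '[')

-- '[]' * depth: Python string repetition (builtin, ported by hand; exact)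
def pvRepBrackets : Nat → String
  | 0 => ""
  | n + 1 => "[]" ++ pvRepBrackets n

-- the for-loop over the pair table: first match wins, else the 'TEXT' default
def pvScanPairs : List (String × String) → String → String → String
  | [], _, suffix => "TEXT" ++ suffix
  | (gq, pg) :: rest, base, suffix =>
      if gq == base then pg ++ suffix else pvScanPairs rest base suffix

def get_pg_type_alt (gq_type : String) : String :=
  let base := pvLstripBrackets gq_type.toList
  let depth := gq_type.toList.length - base.length
  pvScanPairs pvPgPairs (String.ofList base) (pvRepBrackets depth)

-- ===== PRECONDITION & SPEC =====
def Spec_get_pg_type (gq_type : String) (out : String) : Prop := out = get_pg_type_alt gq_type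
instance (gq_type : String) (out : String) : Decidable (Spec_get_pg_type gq_type out) := by unfold Spec_get_pg_type; infer_instance

-- ===== CLAIM =====
def Claim_equal_get_pg_type : Prop := ∀ (gq_type : String), Dom_get_pg_type gq_type → Spec_get_pg_type gq_type (get_pg_type gq_type)

-- ===== LEMMAS AND PROOFS =====
-- the pair-table scan is A's dict lookup followed by appending the suffix
theorem pvScanPairs_eq (l : List (String × String)) (base suffix : String) :
    pvScanPairs l base suffix = PySem.Dict.getD (PySem.Dict.mk l) base "TEXT" ++ suffix := by
  induction l with
  | nil => simp [pvScanPairs, PySem.Dict.getD_eq_get?_getD, PySem.Dict.get?]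
  | cons p rest ih =>
    obtain ⟨gq, pg⟩ := p
    rw [pvScanPairs]
    rw [PySem.Dict.getD_eq_get?_getD, PySem.Dict.get?_mk_cons]
    by_cases h : gq == base
    · simp [h]
    · simp only [h]
      rw [ih, PySem.Dict.getD_eq_get?_getD]
      simp

theorem pvRepBrackets_succ_right (n : Nat) :
    pvRepBrackets (n + 1) = pvRepBrackets n ++ "[]" := by
  induction n with
  | zero => rfl
  | succ m ih =>
    rw [show pvRepBrackets (m + 1 + 1) = "[]" ++ pvRepBrackets (m + 1) from rfl, ih,
        ← String.append_assoc, ← ih]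
    rfl

theorem pvTypeMapping_eq : pvTypeMapping = PySem.Dict.mk pvPgPairs := by decide

theorem pvGetPgA_eq (cs : List Char) :
    pvGetPgA cs =
      pvScanPairs pvPgPairs (String.ofList (pvLstripBrackets cs))
        (pvRepBrackets (cs.length - (pvLstripBrackets cs).length)) := by
  induction cs with
  | nil => simp [pvGetPgA, pvLstripBrackets, pvScanPairs_eq, pvRepBrackets, pvTypeMapping_eq]
  | cons c rest ih =>
    by_cases h : c = '['
    · subst h
      have hdrop : pvLstripBrackets ('[' :: rest) = pvLstripBrackets rest := by
        simp [pvLstripBrackets, List.dropWhile]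
      have hlen : (pvLstripBrackets rest).length ≤ rest.length :=
        List.length_dropWhile_le _ _
      rw [pvGetPgA, ih, hdrop]
      rw [show ('[' :: rest).length - (pvLstripBrackets rest).length
            = (rest.length - (pvLstripBrackets rest).length) + 1 by
          simp [List.length_cons]; omega]
      rw [pvRepBrackets_succ_right, pvScanPairs_eq, pvScanPairs_eq, String.append_assoc]
    · have hA : pvGetPgA (c :: rest) =
          PySem.Dict.getD pvTypeMapping (String.ofList (c :: rest)) "TEXT" := by
        rw [pvGetPgA.eq_def]
        split
        · next heq => injection heq with h1 _; exact absurd h1 h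
        · rfl
      have hdrop : pvLstripBrackets (c :: rest) = c :: rest := by
        simp [pvLstripBrackets, List.dropWhile, beq_eq_false_iff_ne.mpr h]
      rw [hA, hdrop, pvScanPairs_eq, pvTypeMapping_eq]
      simp [pvRepBrackets]

-- ===== VERDICT =====
theorem get_pg_type_spec : Claim_equal_get_pg_type := by
  intro s _
  unfold Spec_get_pg_type get_pg_type get_pg_type_alt
  exact pvGetPgA_eq s.toList
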